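-- pv_equiv track=rewrite | github.com/ONEMYX/goLeetcode | jj/test_15.py | solution
-- ===== SOURCE A (Python) =====
-- def solution(S, T):
--     # 计算最少操作数
--     min_ops = len(S)  # 初始化为S的长度（最大删除次数）
--
--     # 循环长度应该是S和T的最小长度
--     min_len = min(len(S), len(T))
--
--     # 尝试让S成为T的每个可能前缀
--     for prefix_len in range(min_len + 1):
--         ops = 0
--
--         # 如果S的长度大于当前前缀长度，需要删除多余的字符
--         if len(S) > prefix_len:
--             ops += len(S) - prefix_len
--
--         # 计算需要修改的字符数（比较S和T的前prefix_len个字符）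
--         for i in range(prefix_len):
--             if S[i] != T[i]:
--                 ops += 1
--
--         if ops < min_ops:
--             min_ops = ops
--
--     return min_ops
-- ===== SOURCE B (Python) =====
-- def solution(S, T):
--     # single pass: running mismatch count over zipped prefix, min on the fly
--     n = len(S)
--     best = n
--     mis = 0
--     removed = n
--     for a, b in zip(S, T):
--         if a != b:
--             mis += 1
--         removed -= 1
--         best = min(best, removed + mis)
--     return best
-- ===== Notes on version B (the rewrite author's own statement) =====
-- stated objective: faster
-- what changed: Replace the nested loop (for every prefix length, rescan the prefix counting mismatches) by a single pass over zip(S,T) that maintains a running mismatch count and takes the minimum on the fly.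
import Mathlib
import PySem

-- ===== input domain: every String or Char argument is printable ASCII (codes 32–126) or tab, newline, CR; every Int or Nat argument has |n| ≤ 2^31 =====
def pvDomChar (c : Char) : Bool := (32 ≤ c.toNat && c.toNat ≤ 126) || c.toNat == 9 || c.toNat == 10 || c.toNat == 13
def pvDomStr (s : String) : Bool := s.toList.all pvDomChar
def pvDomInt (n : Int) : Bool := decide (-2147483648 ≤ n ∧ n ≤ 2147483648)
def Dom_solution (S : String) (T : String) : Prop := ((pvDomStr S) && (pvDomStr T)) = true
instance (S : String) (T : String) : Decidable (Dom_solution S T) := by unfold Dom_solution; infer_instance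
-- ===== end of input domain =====

-- B replaces A's quadratic rescan of every prefix by one pass with a running mismatch count (objective: faster).

-- ===== PORT A =====
-- literal port of A; S[i]/T[i] via pyGet? (both indices are always in range here, so no exception path is reachable)
def solution (S : String) (T : String) : Int :=
  let s := S.toList
  let t := T.toList
  let minOps : Int := s.length
  let minLen : Nat := min s.length t.length
  (PySem.List.pyRange 0 ((minLen : Int) + 1) 1).foldl (fun minOps p =>
    let ops : Int := if (s.length : Int) > p then (s.length : Int) - p else 0
    let ops := (PySem.List.pyRange 0 p 1).foldl (fun ops i =>
      if PySem.List.pyGet? s i ≠ PySem.List.pyGet? t i then ops + 1 else ops) ops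
    if ops < minOps then ops else minOps) minOps

-- ===== PORT B =====
def solution_alt (S : String) (T : String) : Int :=
  let s := S.toList
  let t := T.toList
  let n : Int := s.length
  let r := (s.zip t).foldl (fun (acc : Int × Int × Int) ab =>
    let mis := if ab.1 ≠ ab.2 then acc.2.1 + 1 else acc.2.1
    let removed := acc.2.2 - 1
    (min acc.1 (removed + mis), mis, removed)) (n, 0, n)
  r.1

-- ===== PRECONDITION & SPEC =====
def Spec_solution (S : String) (T : String) (out : Int) : Prop := out = solution_alt S T
instance (S : String) (T : String) (out : Int) : Decidable (Spec_solution S T out) := by unfold Spec_solution; infer_instance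

-- ===== CLAIM (what is proved, stated in full; the proofs are below) =====
def Claim_equal_solution : Prop := ∀ (S : String) (T : String), Dom_solution S T → Spec_solution S T (solution S T)

-- ===== LEMMAS AND PROOFS =====

-- number of mismatched pairs, as an Int
def mmInt (z : List (Char × Char)) : Int := ((z.filter (fun ab => ab.1 != ab.2)).length : Int)

-- the common value: min over prefix lengths p ∈ [0..k] of (n - p) + mismatches among first p pairs
def pvSpec (n : Int) (z : List (Char × Char)) (k : Nat) : Int :=
  (List.range (k+1)).foldl (fun (m : Int) (p : Nat) => min m ((n - (p:Int)) + mmInt (z.take p))) n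

theorem mmInt_nil : mmInt [] = 0 := by simp [mmInt]

theorem mmInt_append (a b : List (Char × Char)) : mmInt (a ++ b) = mmInt a + mmInt b := by
  simp [mmInt, List.filter_append]

theorem mmInt_cons (ab : Char × Char) (z : List (Char × Char)) :
    mmInt (ab :: z) = (if ab.1 ≠ ab.2 then (1:Int) else 0) + mmInt z := by
  by_cases h : ab.1 = ab.2 <;> simp [mmInt, h] <;> omega

-- A's inner loop counts mismatches over the first p zipped pairs
theorem innerA (s t : List Char) (p : Nat) (hp : p ≤ min s.length t.length) (c : Int) :
    (PySem.List.pyRange 0 (p:Int) 1).foldl (fun ops i =>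
      if PySem.List.pyGet? s i ≠ PySem.List.pyGet? t i then ops + 1 else ops) c
    = c + mmInt ((s.zip t).take p) := by
  induction p generalizing c with
  | zero => simp [PySem.List.pyRange_one_eq_nil, mmInt_nil]
  | succ p ih =>
    have hp' : p ≤ min s.length t.length := Nat.le_of_succ_le hp
    have hps : p < s.length := by omega
    have hpt : p < t.length := by omega
    have hsplit : PySem.List.pyRange 0 ((p+1 : Nat) : Int) 1
        = PySem.List.pyRange 0 (p:Int) 1 ++ [(p:Int)] := by
      push_cast
      exact PySem.List.pyRange_one_succ_right (by positivity)
    rw [hsplit, List.foldl_append, ih hp']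
    have hz : p < (s.zip t).length := by simp [List.length_zip]; omega
    have htake : (s.zip t).take (p+1) = (s.zip t).take p ++ [(s[p], t[p])] := by
      rw [List.take_add_one]
      simp [List.getElem?_eq_getElem hz, List.getElem_zip]
    rw [htake, mmInt_append]
    simp only [List.foldl_cons, List.foldl_nil]
    rw [PySem.List.pyGet?_natCast, PySem.List.pyGet?_natCast,
      List.getElem?_eq_getElem hps, List.getElem?_eq_getElem hpt]
    by_cases h : s[p] = t[p] <;> simp [h, mmInt] <;> ring

-- A's outer loop, over plain lists
theorem outerA (s t : List Char) :
    (PySem.List.pyRange 0 (((min s.length t.length : Nat) : Int) + 1) 1).foldl (fun minOps p =>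
      let ops : Int := if (s.length : Int) > p then (s.length : Int) - p else 0
      let ops := (PySem.List.pyRange 0 p 1).foldl (fun ops i =>
        if PySem.List.pyGet? s i ≠ PySem.List.pyGet? t i then ops + 1 else ops) ops
      if ops < minOps then ops else minOps) (s.length : Int)
    = pvSpec (s.length : Int) (s.zip t) (min s.length t.length) := by
  unfold pvSpec
  have hconv : PySem.List.pyRange 0 (((min s.length t.length : Nat) : Int) + 1) 1
      = (List.range (min s.length t.length + 1)).map (fun j : Nat => (j : Int)) := by
    rw [PySem.List.pyRange_one]
    have h1 : ((((min s.length t.length : Nat) : Int) + 1) - 0).toNat = min s.length t.length + 1 := by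
      omega
    rw [h1]
    simp
  rw [hconv, List.foldl_map]
  apply PySem.List.foldl_congr_mem
  intro m p hp
  have hp' : p ≤ min s.length t.length := by
    have := List.mem_range.mp hp; omega
  simp only []
  have hops0 : (if (s.length : Int) > (p:Int) then (s.length : Int) - (p:Int) else 0)
      = (s.length : Int) - (p:Int) := by
    have : p ≤ s.length := le_trans hp' (by omega)
    split <;> omega
  rw [hops0, innerA s t p hp']
  rw [min_def]
  split <;> split <;> omega

-- A equals the common value (definitional unfolding of the let-bindings)
theorem A_eq_spec (S T : String) :
    solution S T = pvSpec (S.toList.length : Int) (S.toList.zip T.toList) (min S.toList.length T.toList.length) :=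
  outerA S.toList T.toList

-- B's fold, characterised over an arbitrary suffix
theorem B_fold (z : List (Char × Char)) (best mis removed : Int) :
    (z.foldl (fun (acc : Int × Int × Int) ab =>
      let mis := if ab.1 ≠ ab.2 then acc.2.1 + 1 else acc.2.1
      let removed := acc.2.2 - 1
      (min acc.1 (removed + mis), mis, removed)) (best, mis, removed)).1
    = (List.range z.length).foldl
        (fun (m : Int) (p : Nat) => min m ((removed - ((p:Int)+1)) + mis + mmInt (z.take (p+1)))) best := by
  induction z generalizing best mis removed with
  | nil => simp
  | cons ab z ih =>
    simp only [List.foldl_cons]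
    rw [ih]
    have hlen : (ab :: z).length = z.length + 1 := rfl
    rw [hlen, List.range_succ_eq_map]
    simp only [List.foldl_cons, List.foldl_map]
    have hinit : min best ((removed - (((0:Nat):Int)+1)) + mis + mmInt ((ab :: z).take (0+1)))
        = min best ((removed - 1) + (if ab.1 ≠ ab.2 then mis + 1 else mis)) := by
      rw [List.take_succ_cons, List.take_zero, mmInt_cons, mmInt_nil]
      by_cases h : ab.1 = ab.2 <;> simp [h] <;> ring_nf
    rw [hinit]
    apply PySem.List.foldl_congr_mem
    intro m p _
    rw [List.take_succ_cons, mmInt_cons]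
    by_cases h : ab.1 = ab.2 <;> simp [h] <;> ring_nf

-- B's fold, over plain lists, from the initial state
theorem outerB (s t : List Char) :
    ((s.zip t).foldl (fun (acc : Int × Int × Int) ab =>
      let mis := if ab.1 ≠ ab.2 then acc.2.1 + 1 else acc.2.1
      let removed := acc.2.2 - 1
      (min acc.1 (removed + mis), mis, removed)) ((s.length : Int), 0, (s.length : Int))).1
    = pvSpec (s.length : Int) (s.zip t) (min s.length t.length) := by
  rw [B_fold]
  unfold pvSpec
  have hzl : (s.zip t).length = min s.length t.length := List.length_zip
  rw [hzl, List.range_succ_eq_map]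
  simp only [List.foldl_cons, List.foldl_map]
  rw [List.take_zero, mmInt_nil]
  norm_num

-- B equals the common value
theorem B_eq_spec (S T : String) :
    solution_alt S T = pvSpec (S.toList.length : Int) (S.toList.zip T.toList) (min S.toList.length T.toList.length) :=
  outerB S.toList T.toList

-- ===== VERDICT (by name: the statement is the Claim_ definition above) =====
theorem solution_spec : Claim_equal_solution := by
  intro S T _
  unfold Spec_solution
  rw [A_eq_spec, B_eq_spec]
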